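-- pv_equiv track=rewrite | github.com/mrd19x/hexaclue | jacobi.py | jacobi_symbol
-- ===== SOURCE A (Python) =====
-- def jacobi_symbol(a, n):
--     """Compute the Jacobi symbol (a/n)"""
--     if n <= 0 or n % 2 == 0:
--         raise ValueError("n must be a positive odd integer")
--     a = a % n
--     result = 1
--     while a != 0:
--         while a % 2 == 0:
--             a //= 2
--             if n % 8 == 3 or n % 8 == 5:
--                 result = -result
--         a, n = n, a
--         if a % 4 == 3 and n % 4 == 3:
--             result = -result
--         a = a % n
--     if n == 1:
--         return result
--     return 0  # if n is not a prime
-- ===== SOURCE B (Python) =====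
-- def jacobi_symbol(a, n):
--     """Compute the Jacobi symbol (a/n)"""
--     if n <= 0 or n % 2 == 0:
--         raise ValueError("n must be a positive odd integer")
--     return _jac(a % n, n)
--
--
-- def _jac(a, n):
--     # invariant: 0 <= a < n, n odd
--     if a == 0:
--         return 1 if n == 1 else 0
--     if a % 2 == 0:
--         s = -1 if n % 8 in (3, 5) else 1
--         return s * _jac(a // 2, n)
--     s = -1 if a % 4 == 3 and n % 4 == 3 else 1
--     return s * _jac(n % a, a)
-- ===== Notes on version B (the rewrite author's own statement) =====
-- stated objective: alternative
-- what changed: Replaces A's mutating while-loop with a batched inner halving loop and a running sign accumulator by a direct recursive descent that handles one factor of 2 or one reciprocity swap per call and multiplies the signs on the way back up.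
import Mathlib
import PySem

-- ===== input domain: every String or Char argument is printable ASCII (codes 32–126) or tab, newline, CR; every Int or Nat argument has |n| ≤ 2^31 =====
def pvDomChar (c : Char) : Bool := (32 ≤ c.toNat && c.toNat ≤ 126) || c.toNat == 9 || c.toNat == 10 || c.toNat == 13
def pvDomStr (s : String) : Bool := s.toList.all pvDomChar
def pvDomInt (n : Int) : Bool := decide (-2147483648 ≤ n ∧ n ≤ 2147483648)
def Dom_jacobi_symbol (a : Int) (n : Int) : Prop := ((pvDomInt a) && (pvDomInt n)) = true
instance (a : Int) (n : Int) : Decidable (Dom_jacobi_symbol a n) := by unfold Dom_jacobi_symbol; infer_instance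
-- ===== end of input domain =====

-- B replaces A's mutating while-loop (batched inner halving, running sign accumulator) by a
-- direct recursion doing one factor-of-2 or one reciprocity swap per call; same cost, different structure.


-- ===== PORT A =====
-- A's inner `while a % 2 == 0` loop; the fuel argument only makes the recursion total
-- (a.natAbs halvings always suffice on the states A reaches, where a ≠ 0)
def pvHalveLoop : Nat → Int → Int → Int → Int × Int
  | 0, a, _, r => (a, r)
  | fuel + 1, a, n, r =>
    if PySem.Int.mod a 2 = 0 ∧ a ≠ 0 then
      pvHalveLoop fuel (PySem.Int.floordiv a 2) n
        (if PySem.Int.mod n 8 = 3 ∨ PySem.Int.mod n 8 = 5 then -r else r)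
    else (a, r)

-- A's outer `while a != 0` loop carrying the result accumulator; fuel only makes it total
def pvLoopA : Nat → Int → Int → Int → Int
  | 0, _, _, _ => 0
  | fuel + 1, a, n, result =>
    if a ≠ 0 then
      let p := pvHalveLoop a.natAbs a n result
      let r2 := if PySem.Int.mod n 4 = 3 ∧ PySem.Int.mod p.1 4 = 3 then -p.2 else p.2
      pvLoopA fuel (PySem.Int.mod n p.1) p.1 r2
    else if n = 1 then result else 0

-- Python raises ValueError on the guard; those inputs are excluded by Pre_jacobi_symbol
def jacobi_symbol (a : Int) (n : Int) : Int :=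
  if n ≤ 0 ∨ PySem.Int.mod n 2 = 0 then 0
  else pvLoopA ((PySem.Int.mod a n).natAbs + n.natAbs + 1) (PySem.Int.mod a n) n 1

-- ===== PORT B =====
-- Source B's helper _jac: one factor of 2 or one reciprocity swap per call; fuel only makes it total
def pvJacRec : Nat → Int → Int → Int
  | 0, _, _ => 0
  | fuel + 1, a, n =>
    if a = 0 then (if n = 1 then 1 else 0)
    else if PySem.Int.mod a 2 = 0 then
      (if PySem.Int.mod n 8 = 3 ∨ PySem.Int.mod n 8 = 5 then -1 else 1) *
        pvJacRec fuel (PySem.Int.floordiv a 2) n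
    else
      (if PySem.Int.mod a 4 = 3 ∧ PySem.Int.mod n 4 = 3 then -1 else 1) *
        pvJacRec fuel (PySem.Int.mod n a) a

def jacobi_symbol_alt (a : Int) (n : Int) : Int :=
  if n ≤ 0 ∨ PySem.Int.mod n 2 = 0 then 0
  else pvJacRec ((PySem.Int.mod a n).natAbs + n.natAbs + 1) (PySem.Int.mod a n) n

-- ===== PRECONDITION & SPEC =====
-- Pre_ excludes exactly the inputs (n ≤ 0 or n even) on which A raises ValueError.
def Pre_jacobi_symbol (a : Int) (n : Int) : Prop := 0 < n ∧ PySem.Int.mod n 2 = 1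
instance (a : Int) (n : Int) : Decidable (Pre_jacobi_symbol a n) := by unfold Pre_jacobi_symbol; infer_instance
def pvWitness_jacobi_symbol : Int × Int := (5, 9)

def Spec_jacobi_symbol (a : Int) (n : Int) (out : Int) : Prop := out = jacobi_symbol_alt a n
instance (a : Int) (n : Int) (out : Int) : Decidable (Spec_jacobi_symbol a n out) := by unfold Spec_jacobi_symbol; infer_instance

-- ===== CLAIM (what is proved, stated in full; the proofs are below) =====
def Claim_equal_jacobi_symbol : Prop := ∀ (a : Int) (n : Int), Dom_jacobi_symbol a n → Pre_jacobi_symbol a n → Spec_jacobi_symbol a n (jacobi_symbol a n)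

-- ===== LEMMAS AND PROOFS =====

-- fuel-free reference versions of the three loops (proof helpers only), with the loop invariants as guards

def pvHalveLoopW (a : Int) (n : Int) (r : Int) : Int × Int :=
  if h : PySem.Int.mod a 2 = 0 ∧ a ≠ 0 then
    pvHalveLoopW (PySem.Int.floordiv a 2) n
      (if PySem.Int.mod n 8 = 3 ∨ PySem.Int.mod n 8 = 5 then -r else r)
  else (a, r)
termination_by a.natAbs
decreasing_by
  obtain ⟨h1, h2⟩ := h
  have hd : (2 : Int) ∣ a := (PySem.Int.mod_eq_zero_iff_dvd a 2).1 h1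
  rw [PySem.Int.floordiv_eq_ediv_of_pos (by omega)]
  obtain ⟨k, rfl⟩ := hd
  rw [Int.mul_ediv_cancel_left k (by norm_num)]
  simp [Int.natAbs_mul]; omega

theorem pvHalveLoopW_spec (a n r : Int) (ha : 0 < a) :
    0 < (pvHalveLoopW a n r).1 ∧ (pvHalveLoopW a n r).1 ≤ a ∧
      PySem.Int.mod (pvHalveLoopW a n r).1 2 ≠ 0 := by
  fun_induction pvHalveLoopW a n r with
  | case1 a r h ih =>
    have hd : (2 : Int) ∣ a := (PySem.Int.mod_eq_zero_iff_dvd a 2).1 h.1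
    have he : PySem.Int.floordiv a 2 = a / 2 := PySem.Int.floordiv_eq_ediv_of_pos (by omega)
    obtain ⟨k, rfl⟩ := hd
    have hk : (2 * k) / 2 = k := Int.mul_ediv_cancel_left k (by norm_num)
    have ihk := ih (by rw [he, hk]; omega)
    simp only [dite_eq_ite] at ihk
    rw [he, hk] at ihk ⊢
    exact ⟨ihk.1, by omega, ihk.2.2⟩
  | case2 a r _h =>
    refine ⟨ha, le_refl _, ?_⟩
    intro hm; exact _h ⟨hm, by omega⟩

def pvLoopAW (a : Int) (n : Int) (result : Int) : Int :=
  if h : a ≠ 0 ∧ 0 < a ∧ a < n then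
    let p := pvHalveLoopW a n result
    let r2 := if PySem.Int.mod n 4 = 3 ∧ PySem.Int.mod p.1 4 = 3 then -p.2 else p.2
    pvLoopAW (PySem.Int.mod n p.1) p.1 r2
  else if n = 1 then result else 0
termination_by a.natAbs + n.natAbs
decreasing_by
  obtain ⟨h0, h1, h2⟩ := h
  obtain ⟨hp1, hp2, _⟩ := pvHalveLoopW_spec a n result h1
  have hm1 := PySem.Int.mod_nonneg n hp1
  have hm2 := PySem.Int.mod_lt n hp1
  omega

def pvJacRecW (a : Int) (n : Int) : Int :=
  if h : a ≠ 0 ∧ 0 < a ∧ a < n then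
    if PySem.Int.mod a 2 = 0 then
      (if PySem.Int.mod n 8 = 3 ∨ PySem.Int.mod n 8 = 5 then -1 else 1) *
        pvJacRecW (PySem.Int.floordiv a 2) n
    else
      (if PySem.Int.mod a 4 = 3 ∧ PySem.Int.mod n 4 = 3 then -1 else 1) *
        pvJacRecW (PySem.Int.mod n a) a
  else if n = 1 then 1 else 0
termination_by a.natAbs + n.natAbs
decreasing_by
  · obtain ⟨h0, h1, h2⟩ := h
    have hd : (2 : Int) ∣ a := (PySem.Int.mod_eq_zero_iff_dvd a 2).1 (by assumption)
    rw [PySem.Int.floordiv_eq_ediv_of_pos (by omega)]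
    obtain ⟨k, rfl⟩ := hd
    rw [Int.mul_ediv_cancel_left k (by norm_num)]
    simp [Int.natAbs_mul]; omega
  · obtain ⟨h0, h1, h2⟩ := h
    have hm1 := PySem.Int.mod_nonneg n h1
    have hm2 := PySem.Int.mod_lt n h1
    omega

-- the batched halving loop of A equals iterating B's even step, signs pulled into the accumulator
theorem pvHalveLoopW_bridge (a n r : Int) (h1 : 0 < a) (h2 : a < n) :
    r * pvJacRecW a n = (pvHalveLoopW a n r).2 * pvJacRecW (pvHalveLoopW a n r).1 n := by
  fun_induction pvHalveLoopW a n r with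
  | case1 a r h ih =>
    have hd : (2 : Int) ∣ a := (PySem.Int.mod_eq_zero_iff_dvd a 2).1 h.1
    have he : PySem.Int.floordiv a 2 = a / 2 := PySem.Int.floordiv_eq_ediv_of_pos (by omega)
    obtain ⟨k, rfl⟩ := hd
    have hk : (2 * k) / 2 = k := Int.mul_ediv_cancel_left k (by norm_num)
    have ihk := ih (by rw [he, hk]; omega) (by rw [he, hk]; omega)
    simp only [dite_eq_ite] at ihk
    rw [pvJacRecW, dif_pos ⟨h.2, h1, h2⟩, if_pos h.1]
    rw [← ihk]
    split_ifs <;> ring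
  | case2 a r _h => rfl

-- B's odd (reciprocity) step as an equation, for rewriting a specific instance
theorem pvJacRecW_odd_step (a n : Int) (h0 : a ≠ 0) (h1 : 0 < a) (h2 : a < n)
    (hodd : PySem.Int.mod a 2 ≠ 0) :
    pvJacRecW a n =
      (if PySem.Int.mod a 4 = 3 ∧ PySem.Int.mod n 4 = 3 then (-1 : Int) else 1) *
        pvJacRecW (PySem.Int.mod n a) a := by
  rw [pvJacRecW, dif_pos ⟨h0, h1, h2⟩, if_neg hodd]

theorem pvLoopAW_eq (a n r : Int) : pvLoopAW a n r = r * pvJacRecW a n := by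
  fun_induction pvLoopAW a n r with
  | case1 a n r h p r2 ih =>
    have hp : p = pvHalveLoopW a n r := rfl
    have hr2 : r2 = if PySem.Int.mod n 4 = 3 ∧ PySem.Int.mod p.1 4 = 3 then -p.2 else p.2 := rfl
    obtain ⟨h0, h1, h2⟩ := h
    obtain ⟨hp1, hp2, hodd⟩ := pvHalveLoopW_spec a n r h1
    rw [← hp] at hp1 hp2 hodd
    rw [ih, pvHalveLoopW_bridge a n r h1 h2, ← hp]
    rw [pvJacRecW_odd_step p.1 n (by omega) hp1 (by omega) hodd]
    rw [hr2]
    split_ifs with hA hB <;> try ring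
    all_goals (exfalso; tauto)
  | case2 a r h =>
    rw [pvJacRecW, dif_neg h]
    simp
  | case3 a n r h hn =>
    rw [pvJacRecW, dif_neg h, if_neg hn]
    ring

-- with at least a.natAbs fuel the fueled inner loop computes the fuel-free one
theorem pvHalveLoop_fuel (a n r : Int) (fuel : Nat) (hf : a.natAbs ≤ fuel) :
    pvHalveLoop fuel a n r = pvHalveLoopW a n r := by
  fun_induction pvHalveLoopW a n r generalizing fuel with
  | case1 a r h ih =>
    have hd : (2 : Int) ∣ a := (PySem.Int.mod_eq_zero_iff_dvd a 2).1 h.1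
    have he : PySem.Int.floordiv a 2 = a / 2 := PySem.Int.floordiv_eq_ediv_of_pos (by omega)
    obtain ⟨k, rfl⟩ := hd
    have hk : (2 * k) / 2 = k := Int.mul_ediv_cancel_left k (by norm_num)
    obtain _ | f := fuel
    · exfalso; have : (2 * k).natAbs ≠ 0 := by simpa using h.2
      omega
    · rw [pvHalveLoop, if_pos h]
      exact ih f (by rw [he, hk]; simp [Int.natAbs_mul] at hf ⊢; omega)
  | case2 a r _h =>
    obtain _ | f := fuel
    · rfl
    · rw [pvHalveLoop, if_neg _h]

-- with enough fuel the fueled outer loop computes the fuel-free one (on the reachable states 0 ≤ a < n)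
theorem pvLoopA_fuel (a n r : Int) (fuel : Nat) (ha : 0 ≤ a) (han : a < n)
    (hf : a.natAbs + n.natAbs ≤ fuel) :
    pvLoopA fuel a n r = pvLoopAW a n r := by
  fun_induction pvLoopAW a n r generalizing fuel with
  | case1 a n r h p r2 ih =>
    have hp : p = pvHalveLoopW a n r := rfl
    obtain ⟨h0, h1, h2⟩ := h
    obtain ⟨hp1, hp2, _⟩ := pvHalveLoopW_spec a n r h1
    rw [← hp] at hp1 hp2
    have hm1 := PySem.Int.mod_nonneg n hp1
    have hm2 := PySem.Int.mod_lt n hp1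
    obtain _ | f := fuel
    · exfalso; omega
    · rw [pvLoopA, if_pos h0, pvHalveLoop_fuel a n r a.natAbs (le_refl _), ← hp]
      exact ih f hm1 hm2 (by omega)
  | case2 a r h =>
    obtain _ | f := fuel
    · exfalso; omega
    · rw [pvLoopA, if_neg (by omega), if_pos rfl]
  | case3 a n r h hn =>
    obtain _ | f := fuel
    · exfalso; omega
    · rw [pvLoopA, if_neg (by omega), if_neg hn]

-- with enough fuel the fueled recursion of B computes the fuel-free one (on the reachable states 0 ≤ a < n)
theorem pvJacRec_fuel (a n : Int) (fuel : Nat) (ha : 0 ≤ a) (han : a < n)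
    (hf : a.natAbs + n.natAbs ≤ fuel) :
    pvJacRec fuel a n = pvJacRecW a n := by
  fun_induction pvJacRecW a n generalizing fuel with
  | case1 a n h heven ih =>
    obtain ⟨h0, h1, h2⟩ := h
    obtain _ | f := fuel
    · exfalso; omega
    · rw [pvJacRec, if_neg h0]
      have hd : (2 : Int) ∣ a := (PySem.Int.mod_eq_zero_iff_dvd a 2).1 heven
      have he : PySem.Int.floordiv a 2 = a / 2 := PySem.Int.floordiv_eq_ediv_of_pos (by omega)
      rw [if_pos heven]
      congr 1
      obtain ⟨k, rfl⟩ := hd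
      have hk : (2 * k) / 2 = k := Int.mul_ediv_cancel_left k (by norm_num)
      exact ih f (by rw [he, hk]; omega) (by rw [he, hk]; omega)
        (by rw [he, hk]; simp [Int.natAbs_mul] at hf ⊢; omega)
  | case2 a n h hodd ih =>
    obtain ⟨h0, h1, h2⟩ := h
    obtain _ | f := fuel
    · exfalso; omega
    · rw [pvJacRec, if_neg h0, if_neg hodd]
      congr 1
      have hm1 := PySem.Int.mod_nonneg n h1
      have hm2 := PySem.Int.mod_lt n h1
      exact ih f hm1 hm2 (by omega)
  | case3 a h =>
    have ha0 : a = 0 := by omega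
    obtain _ | f := fuel
    · exfalso; omega
    · rw [pvJacRec, if_pos ha0]; simp
  | case4 a n h hn =>
    have ha0 : a = 0 := by omega
    obtain _ | f := fuel
    · exfalso; omega
    · rw [pvJacRec, if_pos ha0, if_neg hn]

-- ===== VERDICT (by name: the statement is the Claim_ definition above) =====
theorem jacobi_symbol_spec : Claim_equal_jacobi_symbol := by
  intro a n _ hpre
  unfold Spec_jacobi_symbol jacobi_symbol jacobi_symbol_alt
  obtain ⟨h1, h2⟩ := hpre
  have hg : ¬ (n ≤ 0 ∨ PySem.Int.mod n 2 = 0) := by omega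
  rw [if_neg hg, if_neg hg]
  have hm1 := PySem.Int.mod_nonneg a h1
  have hm2 := PySem.Int.mod_lt a h1
  rw [pvLoopA_fuel _ n 1 _ hm1 hm2 (by omega),
      pvJacRec_fuel _ n _ hm1 hm2 (by omega),
      pvLoopAW_eq, one_mul]
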